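-- pv_equiv track=rewrite | github.com/jarechalde/BioInformatics | Assignment_3/Breakpoints.py | countbreakpoints
-- ===== SOURCE A (Python) =====
-- def countbreakpoints(list):
--  #Initialize the number of breakpoints to 0
--  breakpoints = 0
--
--  #Increasing or decreasing strip indicator
--  increasing = 0
--  decreasing = 0
--
--  for i in range(0,len(list)-1):
--   number = list[i]
--   next_number = list[i+1]
--
--   #If we haven't found if the strip is decreasing
--   #Or increasing we check that
--   if increasing == 0 and decreasing == 0:
--    if next_number==number+1:
--     increasing = 1
--     continue
--
--    elif next_number==number-1:
--     decreasing = 1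
--     continue
--
--    else:
--     breakpoints = breakpoints+1
--
--   if increasing == 1:
--    if next_number == number+1:
--     continue
--    else:
--     breakpoints = breakpoints+1
--     increasing = 0
--     decreasing = 0
--
--   elif decreasing == 1:
--    if next_number == number-1:
--     continue
--    else:
--     breakpoints = breakpoints+1
--     increasing = 0
--     decreasing = 0
--
--  return breakpoints
-- ===== SOURCE B (Python) =====
-- def countbreakpoints(list):
--     breakpoints = 0
--     n = len(list)
--     i = 0
--     while i < n - 1:
--         d = list[i + 1] - list[i]
--         if d == 1 or d == -1:
--             # strip start: consume every following pair with the same diff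
--             i += 1
--             while i < n - 1 and list[i + 1] - list[i] == d:
--                 i += 1
--             if i < n - 1:
--                 # the strip was broken mid-list: count the breaking pair and skip it
--                 breakpoints += 1
--                 i += 1
--         else:
--             breakpoints += 1
--             i += 1
--     return breakpoints
-- ===== Notes on version B (the rewrite author's own statement) =====
-- stated objective: alternative
-- what changed: Replaced A's persistent increasing/decreasing state flags carried across a single for-loop by an outer while-loop with an inner run-consuming while-loop that swallows each +/-1 strip and counts a break only when a pair breaks the strip mid-list.
import Mathlib
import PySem

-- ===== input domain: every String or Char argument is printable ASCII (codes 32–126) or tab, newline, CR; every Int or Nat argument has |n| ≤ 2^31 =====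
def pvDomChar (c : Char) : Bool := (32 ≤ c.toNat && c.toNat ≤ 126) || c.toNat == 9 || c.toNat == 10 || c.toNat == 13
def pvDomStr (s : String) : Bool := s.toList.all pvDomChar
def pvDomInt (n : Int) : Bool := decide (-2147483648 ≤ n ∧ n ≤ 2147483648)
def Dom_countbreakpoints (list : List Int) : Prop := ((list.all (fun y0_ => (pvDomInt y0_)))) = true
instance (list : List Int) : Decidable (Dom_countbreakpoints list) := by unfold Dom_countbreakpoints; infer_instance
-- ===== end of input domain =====

-- B replaces A's persistent increasing/decreasing state flags by nested run-consumption
-- (an inner loop that swallows each ±1 strip); objective: alternative decomposition, same O(n) cost.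

-- ===== PORT A =====
-- A's for-loop over i in range(0, len-1) reads exactly the adjacent pairs (list[i], list[i+1]);
-- it is transcribed as the structural recursion over adjacent pairs with the same
-- (breakpoints, increasing, decreasing) state.
def goA_countbreakpoints : List Int → Int → Int → Int → Int
  | a :: b :: rest, bp, inc, dec =>
    if inc = 0 ∧ dec = 0 then
      if b = a + 1 then goA_countbreakpoints (b :: rest) bp 1 dec          -- increasing = 1; continue
      else if b = a - 1 then goA_countbreakpoints (b :: rest) bp inc 1    -- decreasing = 1; continue
      else
        -- breakpoints += 1; the following inc==1 / dec==1 checks are false here (inc=0, dec=0)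
        goA_countbreakpoints (b :: rest) (bp + 1) inc dec
    else if inc = 1 then
      if b = a + 1 then goA_countbreakpoints (b :: rest) bp inc dec        -- continue
      else goA_countbreakpoints (b :: rest) (bp + 1) 0 0
    else if dec = 1 then
      if b = a - 1 then goA_countbreakpoints (b :: rest) bp inc dec        -- continue
      else goA_countbreakpoints (b :: rest) (bp + 1) 0 0
    else goA_countbreakpoints (b :: rest) bp inc dec                        -- unreachable state
  | _, bp, _, _ => bp

def countbreakpoints (list : List Int) : Int := goA_countbreakpoints list 0 0 0

-- ===== PORT B =====
-- inner while: advance while the next pair keeps the same diff d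
def consumeB_countbreakpoints (d : Int) : List Int → List Int
  | x :: y :: r => if y - x = d then consumeB_countbreakpoints d (y :: r) else x :: y :: r
  | l => l

-- needed by goB's termination
theorem consumeB_length (d : Int) : ∀ l : List Int, (consumeB_countbreakpoints d l).length ≤ l.length
  | [] => le_refl _
  | [_] => le_refl _
  | x :: y :: r => by
      rw [consumeB_countbreakpoints]
      split
      · exact le_trans (consumeB_length d (y :: r)) (by simp)
      · exact le_refl _

-- outer while over index i (the sublist starting at i); 'i < n-1' = at least two elements remain
def goB_countbreakpoints : List Int → Int → Int
  | a :: b :: rest, bp =>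
    if b - a = 1 ∨ b - a = -1 then
      let rest' := consumeB_countbreakpoints (b - a) (b :: rest)
      if 2 ≤ rest'.length then goB_countbreakpoints rest'.tail (bp + 1) else bp
    else goB_countbreakpoints (b :: rest) (bp + 1)
  | _, bp => bp
termination_by l _ => l.length
decreasing_by
  · have h := consumeB_length (b - a) (b :: rest)
    simp only [rest', List.length_tail, List.length_cons] at *
    omega
  · simp

def countbreakpoints_alt (list : List Int) : Int := goB_countbreakpoints list 0

-- ===== PRECONDITION & SPEC =====
def Spec_countbreakpoints (list : List Int) (out : Int) : Prop := out = countbreakpoints_alt list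
instance (list : List Int) (out : Int) : Decidable (Spec_countbreakpoints list out) := by unfold Spec_countbreakpoints; infer_instance

-- ===== CLAIM (what is proved, stated in full; the proofs are below) =====
def Claim_equal_countbreakpoints : Prop := ∀ (list : List Int), Dom_countbreakpoints list → Spec_countbreakpoints list (countbreakpoints list)

-- ===== LEMMAS AND PROOFS =====

-- what A computes from a strip state with diff d (inc/dec set), phrased via B's pieces
def stripRes (d : Int) (l : List Int) (bp : Int) : Int :=
  let l' := consumeB_countbreakpoints d l
  if 2 ≤ l'.length then goB_countbreakpoints l'.tail (bp + 1) else bp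

theorem main_countbreakpoints : ∀ (n : Nat) (l : List Int) (bp : Int), l.length ≤ n →
    goA_countbreakpoints l bp 0 0 = goB_countbreakpoints l bp ∧
    goA_countbreakpoints l bp 1 0 = stripRes 1 l bp ∧
    goA_countbreakpoints l bp 0 1 = stripRes (-1) l bp := by
  intro n
  induction n with
  | zero =>
    intro l bp hl
    have : l = [] := List.eq_nil_of_length_eq_zero (Nat.le_zero.mp hl)
    subst this
    simp [goA_countbreakpoints, goB_countbreakpoints, stripRes, consumeB_countbreakpoints]
  | succ m ih =>
    intro l bp hl
    match l with
    | [] => simp [goA_countbreakpoints, goB_countbreakpoints, stripRes, consumeB_countbreakpoints]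
    | [a] => simp [goA_countbreakpoints, goB_countbreakpoints, stripRes, consumeB_countbreakpoints]
    | a :: b :: rest =>
      have hlen : (b :: rest).length ≤ m := by simp at hl ⊢; omega
      refine ⟨?_, ?_, ?_⟩
      · -- neutral state
        rw [goA_countbreakpoints, goB_countbreakpoints]
        by_cases h1 : b = a + 1
        · have hd : b - a = 1 := by omega
          rw [if_pos ⟨rfl, rfl⟩, if_pos h1, if_pos (Or.inl hd)]
          exact (ih (b :: rest) bp hlen).2.1 ▸ by simp [hd, stripRes]
        · by_cases h2 : b = a - 1
          · have hd : b - a = -1 := by omega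
            rw [if_pos ⟨rfl, rfl⟩, if_neg h1, if_pos h2, if_pos (Or.inr hd)]
            exact (ih (b :: rest) bp hlen).2.2 ▸ by simp [hd, stripRes]
          · have hd : ¬(b - a = 1 ∨ b - a = -1) := by omega
            rw [if_pos ⟨rfl, rfl⟩, if_neg h1, if_neg h2, if_neg hd]
            exact (ih (b :: rest) (bp + 1) hlen).1
      · -- increasing strip state
        rw [goA_countbreakpoints]
        rw [if_neg (by simp), if_pos rfl]
        by_cases h1 : b = a + 1
        · rw [if_pos h1]
          have := (ih (b :: rest) bp hlen).2.1
          rw [this]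
          simp only [stripRes]
          rw [consumeB_countbreakpoints, if_pos (by omega : b - a = (1:Int))]
        · rw [if_neg h1]
          have := (ih (b :: rest) (bp + 1) hlen).1
          rw [this]
          simp only [stripRes]
          rw [consumeB_countbreakpoints, if_neg (by omega : ¬ b - a = (1:Int))]
          simp
      · -- decreasing strip state
        rw [goA_countbreakpoints]
        rw [if_neg (by simp), if_neg (by norm_num), if_pos rfl]
        by_cases h2 : b = a - 1
        · rw [if_pos h2]
          have := (ih (b :: rest) bp hlen).2.2
          rw [this]
          simp only [stripRes]
          rw [consumeB_countbreakpoints, if_pos (by omega : b - a = (-1:Int))]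
        · rw [if_neg h2]
          have := (ih (b :: rest) (bp + 1) hlen).1
          rw [this]
          simp only [stripRes]
          rw [consumeB_countbreakpoints, if_neg (by omega : ¬ b - a = (-1:Int))]
          simp

-- ===== VERDICT (by name: the statement is the Claim_ definition above) =====
theorem countbreakpoints_spec : Claim_equal_countbreakpoints := by
  intro list _
  unfold Spec_countbreakpoints countbreakpoints countbreakpoints_alt
  exact (main_countbreakpoints list.length list 0 (le_refl _)).1
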